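-- pv_equiv track=rewrite | github.com/uygarpolat/leetcode-daily | 2025-01/2025.01.11-Medium.py | canConstruct
-- ===== SOURCE A (Python) =====
-- from collections import Counter
--
-- def canConstruct(s: str, k: int) -> bool:
-- 	if len(s) < k:
-- 		return False
--
-- 	count = Counter(s)
-- 	oddCount = 0
--
-- 	for value in count.values():
-- 		if value % 2:
-- 			oddCount += 1
--
-- 	if oddCount > k:
-- 		return False
--
-- 	return True
-- ===== SOURCE B (Python) =====
-- def canConstruct(s: str, k: int) -> bool:
--     if len(s) < k:
--         return False
--     t = sorted(s)
--     odd = 0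
--     i = 0
--     while i < len(t):
--         j = i + 1
--         while j < len(t) and t[j] == t[i]:
--             j += 1
--         if (j - i) % 2 == 1:
--             odd += 1
--         i = j
--     return odd <= k
-- ===== Notes on version B (the rewrite author's own statement) =====
-- stated objective: alternative
-- what changed: Replaced the Counter frequency table and the scan over its values by sort-then-scan: sort the characters and count runs of equal characters that have odd length, which equals the number of odd-frequency characters.
import Mathlib
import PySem

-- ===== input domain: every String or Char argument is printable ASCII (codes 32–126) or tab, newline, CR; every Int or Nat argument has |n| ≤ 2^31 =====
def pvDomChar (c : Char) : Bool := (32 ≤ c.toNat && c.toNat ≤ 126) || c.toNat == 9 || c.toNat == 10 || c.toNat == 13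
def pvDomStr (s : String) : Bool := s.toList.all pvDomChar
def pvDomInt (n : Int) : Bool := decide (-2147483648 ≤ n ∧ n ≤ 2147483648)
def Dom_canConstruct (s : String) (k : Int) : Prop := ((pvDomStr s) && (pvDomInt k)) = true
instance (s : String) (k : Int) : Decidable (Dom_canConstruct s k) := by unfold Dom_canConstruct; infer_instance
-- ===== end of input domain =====

-- B replaces A's Counter-then-scan by sort-then-scan: sort the characters and count equal-character
-- runs of odd length; objective: alternative (a genuinely different algorithm of similar practical cost).

-- ===== PORT A =====
def canConstruct (s : String) (k : Int) : Bool :=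
  if (PySem.Str.len s) < k then false
  else
    let count := PySem.Dict.counter s.toList
    let oddCount := count.values.foldl (fun acc v => if v % 2 ≠ 0 then acc + 1 else acc) (0 : Int)
    if oddCount > k then false else true

-- ===== PORT B =====
-- the outer while loop of Source B: scan one run (the inner while = takeWhile of equal chars),
-- add 1 if its length is odd, continue after the run (dropWhile)
def runScan (t : List Char) : Int :=
  match t with
  | [] => 0
  | c :: rest =>
      (if (1 + (rest.takeWhile (fun x => x == c)).length) % 2 = 1 then (1 : Int) else 0)
        + runScan (rest.dropWhile (fun x => x == c))
termination_by t.length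
decreasing_by
  simp only [List.length_cons]
  exact Nat.lt_succ_of_le (List.length_dropWhile_le _ _)

def canConstruct_alt (s : String) (k : Int) : Bool :=
  if (PySem.Str.len s) < k then false
  else decide (runScan (PySem.List.sorted s.toList (fun x => x) false) ≤ k)

-- ===== PRECONDITION & SPEC =====
def Spec_canConstruct (s : String) (k : Int) (out : Bool) : Prop := out = canConstruct_alt s k
instance (s : String) (k : Int) (out : Bool) : Decidable (Spec_canConstruct s k out) := by unfold Spec_canConstruct; infer_instance

-- ===== CLAIM (what is proved, stated in full; the proofs are below) =====
def Claim_equal_canConstruct : Prop := ∀ (s : String) (k : Int), Dom_canConstruct s k → Spec_canConstruct s k (canConstruct s k)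

-- ===== LEMMAS AND PROOFS =====

-- number of odd-frequency characters of t (the common specification of both programs)
def pvOdd (t : List Char) : Nat :=
  ((PySem.Set.ofList t).filter (fun c => decide (t.count c % 2 = 1))).length

-- counting fold over a list of Ints = length of the odd filter
theorem fold_count_odd (l : List Int) (n : Int) :
    l.foldl (fun acc v => if v % 2 ≠ 0 then acc + 1 else acc) n
      = n + ((l.filter (fun v => decide (v % 2 ≠ 0))).length : Int) := by
  induction l generalizing n with
  | nil => simp
  | cons x rest ih =>
    simp only [List.foldl_cons, List.filter_cons, ih]
    by_cases h : x % 2 ≠ 0 <;> simp [h] <;> omega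

-- two Nodup lists with the same membership have the same length
theorem length_eq_of_nodup_mem {α : Type} [DecidableEq α] (l₁ l₂ : List α)
    (h1 : l₁.Nodup) (h2 : l₂.Nodup) (h : ∀ c, c ∈ l₁ ↔ c ∈ l₂) : l₁.length = l₂.length :=
  ((List.perm_ext_iff_of_nodup h1 h2).mpr h).length_eq

-- A's oddCount over the Counter's values = pvOdd
theorem oddCount_eq_pvOdd (cs : List Char) :
    ((PySem.Dict.counter cs).values.foldl (fun acc v => if v % 2 ≠ 0 then acc + 1 else acc) (0 : Int))
      = (pvOdd cs : Int) := by
  have hv : (PySem.Dict.counter cs).values = (PySem.Dict.counter cs).items.map Prod.snd := rfl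
  rw [hv, PySem.Dict.items_counter, List.map_map, fold_count_odd]
  have hcomp : (Prod.snd ∘ fun k => (k, (cs.count k : Int))) = fun k => (cs.count k : Int) := rfl
  rw [hcomp, List.filter_map, List.length_map, zero_add, Nat.cast_inj]
  unfold pvOdd
  congr 1
  apply List.filter_congr
  intro c _
  simp only [Function.comp, decide_eq_decide]
  omega

-- pvOdd is invariant under permutation
theorem pvOdd_perm (t u : List Char) (h : t.Perm u) : pvOdd t = pvOdd u := by
  unfold pvOdd
  apply length_eq_of_nodup_mem
  · exact (PySem.Set.nodup_ofList t).filter _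
  · exact (PySem.Set.nodup_ofList u).filter _
  · intro c
    simp only [List.mem_filter, PySem.Set.mem_ofList, decide_eq_true_eq]
    rw [h.mem_iff, h.count_eq]

-- in a sorted tail whose elements all dominate c, nothing after the c-run equals c
theorem not_mem_dropWhile (c : Char) (rest : List Char)
    (hall : ∀ x ∈ rest, c ≤ x) (hp : rest.Pairwise (· ≤ ·)) :
    c ∉ rest.dropWhile (fun x => x == c) := by
  induction rest with
  | nil => simp
  | cons y r ih =>
    rw [List.dropWhile_cons]
    by_cases hy : (y == c) = true
    · rw [if_pos hy]
      exact ih (fun x hx => hall x (List.mem_cons_of_mem _ hx)) (List.Pairwise.of_cons hp)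
    · rw [if_neg hy]
      have hyc : y ≠ c := by simpa using hy
      have hcy : c < y := lt_of_le_of_ne (hall y (List.mem_cons_self)) (Ne.symm hyc)
      intro hmem
      rcases List.mem_cons.mp hmem with h | h
      · exact hyc h.symm
      · exact absurd (List.rel_of_pairwise_cons hp h) (not_le.mpr hcy)

-- run-length decomposition of pvOdd at the head of a sorted list
theorem pvOdd_cons (c : Char) (rest : List Char) (hp : (c :: rest).Pairwise (· ≤ ·)) :
    pvOdd (c :: rest)
      = (if (1 + (rest.takeWhile (fun x => x == c)).length) % 2 = 1 then 1 else 0)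
        + pvOdd (rest.dropWhile (fun x => x == c)) := by
  set tk := rest.takeWhile (fun x => x == c) with htk
  set td := rest.dropWhile (fun x => x == c) with htd
  have hsplit : tk ++ td = rest := List.takeWhile_append_dropWhile
  have htkall : ∀ x ∈ tk, x = c := by
    intro x hx
    have := List.mem_takeWhile_imp hx
    simpa using this
  have hall : ∀ x ∈ rest, c ≤ x := fun x hx => List.rel_of_pairwise_cons hp hx
  have hcnd : c ∉ td := not_mem_dropWhile c rest hall (List.Pairwise.of_cons hp)
  have htdsub : td.Sublist rest := List.dropWhile_sublist _
  -- count of c in the whole list is 1 + run length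
  have hcc : (c :: rest).count c = 1 + tk.length := by
    have h1 : tk.count c = tk.length := List.count_eq_length.mpr (fun b hb => ((htkall b hb).symm ▸ rfl))
    have h2 : td.count c = 0 := List.count_eq_zero.mpr hcnd
    rw [List.count_cons_self, ← hsplit, List.count_append, h1, h2]
    omega
  -- counts of other chars agree with td
  have hoc : ∀ d, d ≠ c → (c :: rest).count d = td.count d := by
    intro d hd
    have h1 : tk.count d = 0 := List.count_eq_zero.mpr (fun hmem => hd (htkall d hmem))
    have h2 : (c :: rest).count d = rest.count d := by
      simp [Ne.symm hd]
    rw [h2, ← hsplit, List.count_append, h1]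
    omega
  -- membership in the whole list
  have hmem : ∀ d, d ∈ (c :: rest) ↔ d = c ∨ d ∈ td := by
    intro d
    constructor
    · intro h
      rcases List.mem_cons.mp h with h | h
      · exact Or.inl h
      · rw [← hsplit] at h
        rcases List.mem_append.mp h with h | h
        · exact Or.inl (htkall d h)
        · exact Or.inr h
    · rintro (h | h)
      · exact h ▸ List.mem_cons_self
      · exact List.mem_cons_of_mem _ (htdsub.mem h)
  by_cases hparity : (1 + tk.length) % 2 = 1
  · rw [if_pos hparity]
    unfold pvOdd
    have : ((PySem.Set.ofList (c :: rest)).filter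
        (fun d => decide ((c :: rest).count d % 2 = 1))).length
        = (c :: (PySem.Set.ofList td).filter (fun d => decide (td.count d % 2 = 1))).length := by
      apply length_eq_of_nodup_mem
      · exact (PySem.Set.nodup_ofList _).filter _
      · refine List.nodup_cons.mpr ⟨?_, (PySem.Set.nodup_ofList _).filter _⟩
        intro h
        exact hcnd ((PySem.Set.mem_ofList _ _).mp (List.mem_of_mem_filter h))
      · intro d
        simp only [List.mem_filter, PySem.Set.mem_ofList, decide_eq_true_eq, List.mem_cons]
        constructor
        · rintro ⟨hd, hcount⟩
          rcases (hmem d).mp (List.mem_cons.mpr hd) with h | h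
          · exact Or.inl h
          · by_cases hdc : d = c
            · exact Or.inl hdc
            · exact Or.inr ⟨h, by rw [← hoc d hdc]; exact hcount⟩
        · rintro (h | ⟨hd, hcount⟩)
          · subst h; exact ⟨Or.inl rfl, by rw [hcc]; exact hparity⟩
          · have hdc : d ≠ c := fun h => hcnd (h ▸ hd)
            exact ⟨List.mem_cons.mp ((hmem d).mpr (Or.inr hd)), by rw [hoc d hdc]; exact hcount⟩
    rw [this, List.length_cons]
    omega
  · rw [if_neg hparity]
    unfold pvOdd
    have : ((PySem.Set.ofList (c :: rest)).filter
        (fun d => decide ((c :: rest).count d % 2 = 1))).length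
        = ((PySem.Set.ofList td).filter (fun d => decide (td.count d % 2 = 1))).length := by
      apply length_eq_of_nodup_mem
      · exact (PySem.Set.nodup_ofList _).filter _
      · exact (PySem.Set.nodup_ofList _).filter _
      · intro d
        simp only [List.mem_filter, PySem.Set.mem_ofList, decide_eq_true_eq]
        constructor
        · rintro ⟨hd, hcount⟩
          by_cases hdc : d = c
          · subst hdc; rw [hcc] at hcount; exact absurd hcount hparity
          · rcases (hmem d).mp hd with h | h
            · exact absurd h hdc
            · exact ⟨h, by rw [← hoc d hdc]; exact hcount⟩
        · rintro ⟨hd, hcount⟩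
          have hdc : d ≠ c := fun h => hcnd (h ▸ hd)
          exact ⟨(hmem d).mpr (Or.inr hd), by rw [hoc d hdc]; exact hcount⟩
    rw [this]
    omega

-- B's run scan over a sorted list computes pvOdd
theorem runScan_eq (t : List Char) (hp : t.Pairwise (· ≤ ·)) : runScan t = (pvOdd t : Int) := by
  induction t using runScan.induct with
  | case1 => simp [runScan, pvOdd, PySem.Set.ofList]
  | case2 c rest ih =>
    have htd : (rest.dropWhile (fun x => x == c)).Pairwise (· ≤ ·) :=
      List.Pairwise.sublist (List.dropWhile_sublist _) (List.Pairwise.of_cons hp)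
    rw [runScan, ih htd, pvOdd_cons c rest hp]
    push_cast
    split_ifs <;> ring

-- ===== VERDICT (by name: the statement is the Claim_ definition above) =====
theorem canConstruct_spec : Claim_equal_canConstruct := by
  intro s k _
  unfold Spec_canConstruct canConstruct canConstruct_alt
  simp only []
  by_cases h1 : PySem.Str.len s < k
  · rw [if_pos h1, if_pos h1]
  · rw [if_neg h1, if_neg h1]
    have hsorted := PySem.List.sorted_pairwise (xs := s.toList) (key := fun x => x)
    have hperm : (PySem.List.sorted s.toList (fun x => x) false).Perm s.toList :=
      PySem.List.sorted_perm _ _ _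
    rw [runScan_eq _ hsorted, pvOdd_perm _ _ hperm, oddCount_eq_pvOdd]
    by_cases h2 : (pvOdd s.toList : Int) > k
    · rw [if_pos h2, decide_eq_false (by omega)]
    · rw [if_neg h2, decide_eq_true (by omega)]
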